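-- pv_equiv track=rewrite | github.com/erjan/coding_exercises | longest_uncommon_subsequence_ii.py | findLUSlength
-- ===== SOURCE A (Python) =====
-- from typing import List
--
-- from collections import defaultdict
--
-- def findLUSlength(strs: List[str]) -> int:
--     def LCS(s1, s2):
--         m = len(s1)
--         n = len(s2)
--         dp = [[0 for j in range(n+1)] for i in range(m+1)]
--         for i in range(1, m+1):
--             for j in range(1, n+1):
--                 if s1[i-1] == s2[j-1]:
--                     dp[i][j] = 1 + dp[i-1][j-1]
--                 else:
--                     dp[i][j] = max(dp[i-1][j], dp[i][j-1])
--         return dp[m][n]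
--
--     d = defaultdict(lambda : 0)
--     strs.sort(key = lambda x : len(x), reverse=True)
--     for s in strs:
--         d[s] += 1
--
--     for i in range(len(strs)):
--         s = strs[i]
--         if d[s] == 1:
--             # need to check if it is subsequence in any larger strings.
--             for j in range(i):
--                 if LCS(s, strs[j]) == len(s):
--                     break
--             else:
--                 return len(s)
--     return -1
-- ===== SOURCE B (Python) =====
-- from typing import List
-- from collections import Counter
--
-- def findLUSlength(strs: List[str]) -> int:
--     # Note: A sorts its argument in place; B does not mutate strs.
--     def is_subseq(s, t):
--         it = iter(t)
--         return all(c in it for c in s)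
--
--     cnt = Counter(strs)
--     best = -1
--     for s in strs:
--         if cnt[s] == 1 and len(s) > best:
--             if not any(len(t) > len(s) and is_subseq(s, t) for t in strs):
--                 best = len(s)
--     return best
-- ===== Notes on version B (the rewrite author's own statement) =====
-- stated objective: alternative
-- what changed: Replaces the per-pair LCS dynamic-programming table and the sort-then-first-hit scan with a Counter plus a linear two-pointer subsequence test, taking the maximum length over unique strings that are not a subsequence of any strictly longer string (no sorting, and B does not mutate its argument while A sorts it in place).
import Mathlib
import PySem

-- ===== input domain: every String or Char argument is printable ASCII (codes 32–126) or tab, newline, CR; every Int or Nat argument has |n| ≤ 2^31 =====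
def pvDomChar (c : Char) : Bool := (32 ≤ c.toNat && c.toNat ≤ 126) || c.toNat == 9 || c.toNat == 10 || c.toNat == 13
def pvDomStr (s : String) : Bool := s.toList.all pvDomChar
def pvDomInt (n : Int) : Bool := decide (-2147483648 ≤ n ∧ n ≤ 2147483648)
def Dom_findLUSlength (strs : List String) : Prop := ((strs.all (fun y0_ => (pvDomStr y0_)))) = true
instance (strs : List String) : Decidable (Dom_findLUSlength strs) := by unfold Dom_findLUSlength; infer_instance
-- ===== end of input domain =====

-- B replaces A's per-pair LCS dynamic programming and sorted scan by a Counter and a linear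
-- two-pointer subsequence test (A also sorts its argument in place; B does not mutate it —
-- the equivalence proved here is about the return value).

-- ===== PORT A =====
-- dp cell access / in-place update (all indices used by A's loops are in range)
def pvGet2 (dp : List (List Int)) (i j : Nat) : Int := (dp.getD i []).getD j 0
def pvSet2 (dp : List (List Int)) (i j : Nat) (v : Int) : List (List Int) :=
  dp.set i ((dp.getD i []).set j v)

-- A's inner helper LCS(s1, s2): the full (m+1)×(n+1) table, filled row by row
def pvLCS (s1 s2 : String) : Int :=
  let a := s1.toList
  let b := s2.toList
  let m := a.length
  let n := b.length
  -- dp = [[0 for j in range(n+1)] for i in range(m+1)]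
  let dp0 : List (List Int) := List.replicate (m+1) (List.replicate (n+1) (0 : Int))
  -- for i in range(1, m+1): for j in range(1, n+1): …   (Nat loop indices, all nonnegative)
  let dp := (List.range' 1 m).foldl (fun dp i =>
    (List.range' 1 n).foldl (fun dp j =>
      if a.getD (i-1) default = b.getD (j-1) default then
        pvSet2 dp i j (1 + pvGet2 dp (i-1) (j-1))
      else
        pvSet2 dp i j (max (pvGet2 dp (i-1) j) (pvGet2 dp i (j-1)))) dp) dp0
  pvGet2 dp m n

-- 'for j in range(i): if LCS(s, strs[j]) == len(s): break' — true iff some j breaks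
def pvBreakA (s : String) (l : List String) (j i : Nat) : Bool :=
  if j < i then
    (if pvLCS s (l.getD j "") = PySem.Str.len s then true else pvBreakA s l (j+1) i)
  else false
termination_by i - j

-- 'for i in range(len(strs)): …' with the early return, as index recursion
def pvScanA (l : List String) (d : PySem.Dict String Int) (i : Nat) : Int :=
  if _h : i < l.length then
    let s := l.getD i ""
    if d.getD s 0 = 1 then
      (if pvBreakA s l 0 i then pvScanA l d (i+1) else PySem.Str.len s)
    else pvScanA l d (i+1)
  else -1
termination_by l.length - i

def findLUSlength (strs : List String) : Int :=
  let l := PySem.List.sorted strs (fun x => PySem.Str.len x) true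
  let d := l.foldl (fun d s => d.modify s 0 (· + 1)) PySem.Dict.empty
  pvScanA l d 0

-- ===== PORT B =====
-- 'c in it': consume the iterator until c is found, returning the rest
def pvSkipTo (c : Char) : List Char → Option (List Char)
  | [] => none
  | b :: t => if b = c then some t else pvSkipTo c t

-- is_subseq(s, t): two-pointer test
def pvIsSubseq : List Char → List Char → Bool
  | [], _ => true
  | c :: s, t =>
    match pvSkipTo c t with
    | none => false
    | some t' => pvIsSubseq s t'

def findLUSlength_alt (strs : List String) : Int :=
  let cnt := PySem.Dict.counter strs
  strs.foldl (fun best s =>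
    if cnt.getD s 0 = 1 ∧ PySem.Str.len s > best then
      (if strs.any (fun t => decide (PySem.Str.len t > PySem.Str.len s) && pvIsSubseq s.toList t.toList)
       then best else PySem.Str.len s)
    else best) (-1)

-- ===== PRECONDITION & SPEC =====
def Spec_findLUSlength (strs : List String) (out : Int) : Prop := out = findLUSlength_alt strs
instance (strs : List String) (out : Int) : Decidable (Spec_findLUSlength strs out) := by unfold Spec_findLUSlength; infer_instance

-- ===== CLAIM (what is proved, stated in full; the proofs are below) =====
def Claim_equal_findLUSlength : Prop := ∀ (strs : List String), Dom_findLUSlength strs → Spec_findLUSlength strs (findLUSlength strs)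

-- ===== LEMMAS AND PROOFS =====

-- ---- Part I: A's DP table computes lcsF, and full-length lcsF means Sublist ----

-- the textbook LCS recursion, matching from the FRONT (dp reads prefixes from the back,
-- so dp[i][j] = lcsF of the REVERSED prefixes)
def lcsF : List Char → List Char → Nat
  | [], _ => 0
  | _ :: _, [] => 0
  | x :: u, y :: v =>
    if x = y then lcsF u v + 1 else max (lcsF u (y :: v)) (lcsF (x :: u) v)
termination_by u v => u.length + v.length

-- the intended value of dp[i][j]
def pvF (a b : List Char) (i j : Nat) : Nat :=
  lcsF ((a.take i).reverse) ((b.take j).reverse)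

-- the dp table as a function of its cell contents
def dpOf (m n : Nat) (g : Nat → Nat → Int) : List (List Int) :=
  (List.range (m+1)).map (fun r => (List.range (n+1)).map (g r))

-- cell contents after the first i rows are done
def gDone (a b : List Char) (i : Nat) : Nat → Nat → Int :=
  fun r c => if r ≤ i then (pvF a b r c : Int) else 0

-- cell contents while row i is being filled, columns 1..k done
def gRow (a b : List Char) (i k : Nat) : Nat → Nat → Int :=
  fun r c => if r < i then (pvF a b r c : Int) else if r = i ∧ c ≤ k then (pvF a b i c : Int) else 0

theorem lcsF_nil_right (u : List Char) : lcsF u [] = 0 := by cases u <;> simp [lcsF]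

theorem pvF_zero_left (a b : List Char) (j : Nat) : pvF a b 0 j = 0 := by simp [pvF, lcsF]

theorem pvF_zero_right (a b : List Char) (i : Nat) : pvF a b i 0 = 0 := by
  simp [pvF, lcsF_nil_right]

theorem take_succ_rev (a : List Char) (i : Nat) (h : i < a.length) :
    (a.take (i+1)).reverse = a[i] :: (a.take i).reverse := by
  rw [List.take_succ]; simp [List.getElem?_eq_getElem h]

theorem pvF_succ_succ (a b : List Char) (i j : Nat) (hi : i < a.length) (hj : j < b.length) :
    pvF a b (i+1) (j+1) =
      if a[i] = b[j] then pvF a b i j + 1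
      else max (pvF a b i (j+1)) (pvF a b (i+1) j) := by
  unfold pvF; rw [take_succ_rev a i hi, take_succ_rev b j hj, lcsF]

theorem dpOf_congr (m n : Nat) (g g' : Nat → Nat → Int)
    (h : ∀ r ≤ m, ∀ c ≤ n, g r c = g' r c) : dpOf m n g = dpOf m n g' := by
  unfold dpOf
  refine List.map_congr_left (fun r hr => List.map_congr_left (fun c hc => ?_))
  simp at hr hc
  exact h r (by omega) c (by omega)

theorem get2_dpOf (m n : Nat) (g : Nat → Nat → Int) (r c : Nat) (hr : r ≤ m) (hc : c ≤ n) :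
    pvGet2 (dpOf m n g) r c = g r c := by
  unfold pvGet2 dpOf
  rw [PySem.List.getD_map_range _ _ _ _ (by omega), PySem.List.getD_map_range _ _ _ _ (by omega)]

theorem set_map_range {β : Type} (f : Nat → β) (k i : Nat) (v : β) :
    ((List.range k).map f).set i v = (List.range k).map (fun x => if x = i then v else f x) := by
  apply List.ext_getElem
  · simp
  · intro p h1 h2
    simp only [List.getElem_set, List.getElem_map, List.getElem_range]
    simp at h1
    split_ifs with h3 h4 h4 <;> first | rfl | omega

theorem set2_dpOf (m n : Nat) (g : Nat → Nat → Int) (r c : Nat) (v : Int) (hr : r ≤ m) (hc : c ≤ n) :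
    pvSet2 (dpOf m n g) r c v =
      dpOf m n (fun r' c' => if r' = r ∧ c' = c then v else g r' c') := by
  unfold pvSet2 dpOf
  rw [PySem.List.getD_map_range _ _ _ _ (by omega)]
  rw [set_map_range, set_map_range]
  refine List.map_congr_left (fun r' hr' => ?_)
  by_cases h : r' = r
  · subst h
    rw [if_pos rfl]
    refine List.map_congr_left (fun c' hc' => ?_)
    by_cases h2 : c' = c
    · simp [h2]
    · simp [h2]
  · rw [if_neg h]
    refine List.map_congr_left (fun c' hc' => ?_)
    simp [h]

-- the inner loop over j = 1..k fills row i of the table up to column k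
theorem inner_fold (a b : List Char) (i : Nat) (hi1 : 1 ≤ i) (hi : i ≤ a.length) :
    ∀ k ≤ b.length,
      (List.range' 1 k).foldl (fun dp j =>
        if a.getD (i-1) default = b.getD (j-1) default then
          pvSet2 dp i j (1 + pvGet2 dp (i-1) (j-1))
        else
          pvSet2 dp i j (max (pvGet2 dp (i-1) j) (pvGet2 dp i (j-1))))
        (dpOf a.length b.length (gRow a b i 0))
      = dpOf a.length b.length (gRow a b i k) := by
  intro k
  induction k with
  | zero => intro _; rfl
  | succ k ih =>
    intro hk
    have hk' : k ≤ b.length := by omega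
    rw [List.range'_concat, List.foldl_append, ih hk']
    simp only [List.foldl_cons, List.foldl_nil]
    have hil : i - 1 < a.length := by omega
    have hkl : k < b.length := by omega
    have hj1 : 1 + 1 * k - 1 = k := by omega
    have hgetA : a.getD (i-1) default = a[i-1] := List.getD_eq_getElem a default hil
    have hgetB : b.getD (1 + 1 * k - 1) default = b[k] := by
      rw [hj1]; exact List.getD_eq_getElem b default hkl
    have hij : (1 : Nat) + 1 * k = k + 1 := by omega
    have hrec := pvF_succ_succ a b (i-1) k hil hkl
    have hi' : i - 1 + 1 = i := by omega
    rw [hi'] at hrec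
    rw [hgetA, hgetB, hij]
    by_cases hc : a[i-1] = b[k]
    · rw [if_pos hc]
      rw [get2_dpOf _ _ _ _ _ (by omega) (by omega)]
      rw [set2_dpOf _ _ _ _ _ _ (by omega) (by omega)]
      apply dpOf_congr
      intro r hr c hc'
      simp only [gRow, Nat.add_sub_cancel]
      by_cases hri : r = i ∧ c = k + 1
      · obtain ⟨hre, hce⟩ := hri
        subst hce
        rw [hre]
        rw [if_pos ⟨rfl, rfl⟩, if_pos (show i - 1 < i by omega),
            if_neg (by omega), if_pos ⟨rfl, by omega⟩, hrec, if_pos hc]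
        push_cast; ring
      · rw [if_neg hri]
        split_ifs <;> first | rfl | omega
    · rw [if_neg hc]
      rw [get2_dpOf _ _ _ _ _ (by omega) (by omega), get2_dpOf _ _ _ _ _ (by omega) (by omega)]
      rw [set2_dpOf _ _ _ _ _ _ (by omega) (by omega)]
      apply dpOf_congr
      intro r hr c hc'
      simp only [gRow, Nat.add_sub_cancel]
      by_cases hri : r = i ∧ c = k + 1
      · obtain ⟨hre, hce⟩ := hri
        subst hce
        rw [hre]
        rw [if_pos ⟨rfl, rfl⟩, if_pos (show i - 1 < i by omega),
            if_neg (lt_irrefl i), if_pos (show True ∧ k ≤ k by simp),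
            if_neg (lt_irrefl i), if_pos (show i = i ∧ k + 1 ≤ k + 1 by simp),
            hrec, if_neg hc]
        push_cast; ring
      · rw [if_neg hri]
        split_ifs <;> first | rfl | omega

theorem dpOf_const_zero (m n : Nat) :
    List.replicate (m+1) (List.replicate (n+1) (0 : Int)) = dpOf m n (fun _ _ => 0) := by
  simp [dpOf, List.map_const']

-- the outer loop over i = 1..i0 completes the first i0 rows
theorem outer_fold (a b : List Char) :
    ∀ i ≤ a.length,
      (List.range' 1 i).foldl (fun dp i =>
        (List.range' 1 b.length).foldl (fun dp j =>
          if a.getD (i-1) default = b.getD (j-1) default then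
            pvSet2 dp i j (1 + pvGet2 dp (i-1) (j-1))
          else
            pvSet2 dp i j (max (pvGet2 dp (i-1) j) (pvGet2 dp i (j-1)))) dp)
        (List.replicate (a.length+1) (List.replicate (b.length+1) (0 : Int)))
      = dpOf a.length b.length (gDone a b i) := by
  have hbase : List.replicate (a.length+1) (List.replicate (b.length+1) (0 : Int))
      = dpOf a.length b.length (gDone a b 0) := by
    rw [dpOf_const_zero]
    apply dpOf_congr
    intro r _ c _
    simp only [gDone]
    split_ifs with h
    · have : r = 0 := by omega
      subst this; simp [pvF_zero_left]
    · rfl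
  intro i
  induction i with
  | zero => intro _; exact hbase
  | succ i ih =>
    intro hi
    rw [List.range'_concat, List.foldl_append, ih (by omega)]
    simp only [List.foldl_cons, List.foldl_nil]
    have hstart : dpOf a.length b.length (gDone a b i)
        = dpOf a.length b.length (gRow a b (1 + 1 * i) 0) := by
      apply dpOf_congr
      intro r hr c hc
      simp only [gDone, gRow]
      by_cases hri : r ≤ i
      · rw [if_pos hri, if_pos (show r < 1 + 1 * i by omega)]
      · rw [if_neg hri, if_neg (show ¬ r < 1 + 1 * i by omega)]
        by_cases hre : r = 1 + 1 * i ∧ c ≤ 0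
        · rw [if_pos hre]
          have hc0 : c = 0 := by omega
          subst hc0
          simp [pvF_zero_right]
        · rw [if_neg hre]
    rw [hstart, inner_fold a b (1 + 1 * i) (by omega) (by omega) b.length (le_refl _)]
    apply dpOf_congr
    intro r hr c hc
    simp only [gRow, gDone]
    by_cases hri : r < 1 + 1 * i
    · rw [if_pos hri, if_pos (show r ≤ i + 1 by omega)]
    · rw [if_neg hri]
      by_cases hre : r = 1 + 1 * i
      · rw [if_pos ⟨hre, hc⟩, if_pos (show r ≤ i + 1 by omega), hre]
      · rw [if_neg (fun h => hre h.1), if_neg (show ¬ r ≤ i + 1 by omega)]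

theorem pvLCS_eq_lcsF (s1 s2 : String) :
    pvLCS s1 s2 = (lcsF s1.toList.reverse s2.toList.reverse : Int) := by
  show pvGet2 _ _ _ = _
  rw [outer_fold s1.toList s2.toList s1.toList.length (le_refl _)]
  rw [get2_dpOf _ _ _ _ _ (le_refl _) (le_refl _)]
  simp only [gDone, pvF, if_pos (le_refl _)]
  rw [List.take_of_length_le (le_refl _), List.take_of_length_le (le_refl _)]

theorem lcsF_le_left : ∀ (u v : List Char), lcsF u v ≤ u.length
  | [], _ => by simp [lcsF]
  | _ :: _, [] => by simp [lcsF]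
  | x :: u, y :: v => by
    rw [lcsF]
    split_ifs with h
    · have := lcsF_le_left u v; simp; omega
    · have h1 := lcsF_le_left u (y :: v)
      have h2 := lcsF_le_left (x :: u) v
      simp at *; omega
termination_by u v => u.length + v.length

theorem lcsF_of_sublist : ∀ (u v : List Char), u.Sublist v → lcsF u v = u.length
  | [], v, _ => by simp [lcsF]
  | x :: u, y :: v, h => by
    rw [lcsF]
    by_cases hxy : x = y
    · subst hxy
      rw [if_pos rfl, lcsF_of_sublist u v (List.cons_sublist_cons.mp h)]; rfl
    · rw [if_neg hxy]
      have h' : (x :: u).Sublist v := by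
        cases h with
        | cons _ h' => exact h'
        | cons₂ h' => exact absurd rfl hxy
      have e2 := lcsF_of_sublist (x :: u) v h'
      have h1 := lcsF_le_left u (y :: v)
      simp [e2]
      have h2 := lcsF_le_left u (y :: v)
      simp at h2 ⊢
      omega
termination_by u v => u.length + v.length

theorem lcsF_eq_length_iff (u v : List Char) : lcsF u v = u.length ↔ u.Sublist v := by
  constructor
  · induction u generalizing v with
    | nil => intro _; exact List.nil_sublist v
    | cons x u ihu =>
      intro h
      induction v with
      | nil => rw [lcsF_nil_right] at h; simp at h
      | cons y v ihv =>
        rw [lcsF] at h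
        by_cases hxy : x = y
        · subst hxy
          rw [if_pos rfl] at h
          simp at h
          exact List.cons_sublist_cons.mpr (ihu v h)
        · rw [if_neg hxy] at h
          have h1 := lcsF_le_left u (y :: v)
          have : lcsF (x :: u) v = (x :: u).length := by
            simp at h ⊢
            omega
          exact (ihv this).cons y
  · exact lcsF_of_sublist u v

theorem pvLCS_eq_len_iff (s t : String) :
    pvLCS s t = PySem.Str.len s ↔ s.toList.Sublist t.toList := by
  rw [pvLCS_eq_lcsF, PySem.Str.len_eq]
  constructor
  · intro h
    have h' : lcsF s.toList.reverse t.toList.reverse = s.toList.reverse.length := by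
      simp only [List.length_reverse]
      exact_mod_cast h
    exact List.reverse_sublist.mp ((lcsF_eq_length_iff _ _).mp h')
  · intro h
    have h' := (lcsF_eq_length_iff s.toList.reverse t.toList.reverse).mpr
      (List.reverse_sublist.mpr h)
    rw [h']
    simp

-- ---- Part II: the two-pointer test decides Sublist ----

theorem pvIsSubseq_iff : ∀ (v u : List Char), pvIsSubseq u v = true ↔ u.Sublist v := by
  intro v
  induction v with
  | nil =>
    intro u
    cases u with
    | nil => simp [pvIsSubseq]
    | cons c s => simp [pvIsSubseq, pvSkipTo]
  | cons y v ih =>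
    intro u
    cases u with
    | nil => simp [pvIsSubseq]
    | cons c s =>
      by_cases hyc : y = c
      · subst hyc
        have : pvIsSubseq (y :: s) (y :: v) = pvIsSubseq s v := by
          simp [pvIsSubseq, pvSkipTo]
        rw [this, ih s]
        exact (List.cons_sublist_cons).symm
      · have : pvIsSubseq (c :: s) (y :: v) = pvIsSubseq (c :: s) v := by
          simp only [pvIsSubseq, pvSkipTo, if_neg hyc]
        rw [this, ih (c :: s)]
        constructor
        · exact fun h' => h'.cons y
        · intro hs
          cases hs with
          | cons _ h' => exact h'
          | cons₂ h' => exact absurd rfl hyc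

-- ---- Part III: both programs compute the max length over the qualifying strings ----

-- qualifier: unique in strs and not a subsequence of any strictly longer element
def pvQ (strs : List String) (s : String) : Bool :=
  (strs.count s == 1) &&
  !(strs.any (fun t => decide (s.toList.length < t.toList.length) && decide (s.toList.Sublist t.toList)))

theorem foldl_max_of_le (l : List String) (b : Int) (h : ∀ x ∈ l, PySem.Str.len x ≤ b) :
    l.foldl (fun m s => max m (PySem.Str.len s)) b = b := by
  induction l generalizing b with
  | nil => rfl
  | cons x l ih =>
    simp only [List.foldl_cons]
    rw [max_eq_left (h x (by simp))]
    exact ih b (fun y hy => h y (by simp [hy]))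

theorem len_lt_iff (s t : String) :
    PySem.Str.len s < PySem.Str.len t ↔ s.toList.length < t.toList.length := by
  rw [PySem.Str.len_eq, PySem.Str.len_eq]
  exact_mod_cast Iff.rfl

theorem anyB_eq (strs : List String) (s : String) :
    (strs.any (fun t => decide (PySem.Str.len t > PySem.Str.len s) && pvIsSubseq s.toList t.toList))
    = (strs.any (fun t => decide (s.toList.length < t.toList.length) && decide (s.toList.Sublist t.toList))) := by
  induction strs with
  | nil => rfl
  | cons t l ih =>
    simp only [List.any_cons, ih]
    congr 1
    congr 1
    · simp only [gt_iff_lt, decide_eq_decide]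
      exact len_lt_iff s t
    · by_cases h : s.toList.Sublist t.toList
      · simp [h, pvIsSubseq_iff]
      · simp only [h, decide_false]
        rw [← Bool.not_eq_true, pvIsSubseq_iff]
        exact h

theorem stepB_eq (strs : List String) (s : String) (b : Int) :
    (if (PySem.Dict.counter strs).getD s 0 = 1 ∧ PySem.Str.len s > b then
      (if strs.any (fun t => decide (PySem.Str.len t > PySem.Str.len s) && pvIsSubseq s.toList t.toList)
       then b else PySem.Str.len s)
     else b)
    = (if pvQ strs s then max b (PySem.Str.len s) else b) := by
  rw [PySem.Dict.getD_counter, anyB_eq]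
  by_cases hq : pvQ strs s = true
  · rw [if_pos hq]
    simp only [pvQ, Bool.and_eq_true, beq_iff_eq, Bool.not_eq_eq_eq_not, Bool.not_true,
      Bool.not_eq_true'] at hq
    obtain ⟨hc, hna⟩ := hq
    by_cases hb : PySem.Str.len s > b
    · rw [if_pos ⟨by exact_mod_cast congrArg (Nat.cast : Nat → Int) hc, hb⟩, hna,
        if_neg (by simp), max_eq_right (le_of_lt hb)]
    · rw [if_neg (fun h => hb h.2), max_eq_left (by omega)]
  · rw [if_neg hq]
    simp only [pvQ, Bool.and_eq_true, beq_iff_eq, Bool.not_eq_eq_eq_not, Bool.not_true,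
      Bool.not_eq_true', not_and_or] at hq
    by_cases hc : List.count s strs = 1
    · have hna : strs.any (fun t => decide (s.toList.length < t.toList.length) && decide (s.toList.Sublist t.toList)) = true := by
        rcases hq with h | h
        · exact absurd hc h
        · simpa using h
      rw [hna]
      split_ifs with h1 h2 <;> first | rfl | exact absurd rfl h2
    · rw [if_neg (fun h => hc (by exact_mod_cast h.1))]

-- B's fold is the max of the qualifiers' lengths
theorem altB_eq_foldMax (strs : List String) :
    findLUSlength_alt strs =
      ((strs.filter (pvQ strs)).foldl (fun m s => max m (PySem.Str.len s)) (-1)) := by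
  show strs.foldl _ (-1) = _
  have H : ∀ (l : List String) (b : Int),
      l.foldl (fun best s =>
        if (PySem.Dict.counter strs).getD s 0 = 1 ∧ PySem.Str.len s > best then
          (if strs.any (fun t => decide (PySem.Str.len t > PySem.Str.len s) && pvIsSubseq s.toList t.toList)
           then best else PySem.Str.len s)
        else best) b
      = (l.filter (pvQ strs)).foldl (fun m s => max m (PySem.Str.len s)) b := by
    intro l
    induction l with
    | nil => intro b; rfl
    | cons s l ih =>
      intro b
      simp only [List.foldl_cons, List.filter_cons]
      rw [stepB_eq strs s b]
      by_cases hq : pvQ strs s = true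
      · rw [if_pos hq, hq]
        simp only [List.foldl_cons]
        exact ih (max b (PySem.Str.len s))
      · rw [if_neg hq, Bool.not_eq_true] at *
        rw [hq]
        simp only [Bool.false_eq_true, if_false]
        exact ih b
  exact H strs (-1)

-- a value appearing at two distinct positions has count at least 2
theorem two_le_count_of_getElem_eq (L : List String) (i j : Nat)
    (hi : i < L.length) (hj : j < L.length) (hij : i < j) (he : L[i] = L[j]) :
    2 ≤ List.count L[i] L := by
  have h1 : L[i] ∈ L.take (i+1) := by
    have e : (L.take (i+1))[i]'(by simp; omega) = L[i] := List.getElem_take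
    exact e ▸ List.getElem_mem _
  have h2 : L[i] ∈ L.drop (i+1) := by
    have e : (L.drop (i+1))[j - (i+1)]'(by simp; omega) = L[j] := by
      rw [List.getElem_drop]
      congr 1
      omega
    rw [he]
    exact e ▸ List.getElem_mem _
  have c1 : 0 < List.count L[i] (L.take (i+1)) := List.count_pos_iff.mpr h1
  have c2 : 0 < List.count L[i] (L.drop (i+1)) := List.count_pos_iff.mpr h2
  have : List.count L[i] (L.take (i+1)) + List.count L[i] (L.drop (i+1)) = List.count L[i] L := by
    rw [← List.count_append, List.take_append_drop]
  omega

-- pairwise non-increasing lengths, in Nat form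
theorem pair_len_le (L : List String)
    (hpair : L.Pairwise (fun x y => PySem.Str.len y ≤ PySem.Str.len x))
    (i j : Nat) (hi : i < L.length) (hj : j < L.length) (hij : i < j) :
    (L[j]).toList.length ≤ (L[i]).toList.length := by
  have := List.pairwise_iff_getElem.mp hpair i j hi hj hij
  rw [PySem.Str.len_eq, PySem.Str.len_eq] at this
  exact_mod_cast this

-- in the length-sorted list, an earlier supersequence exists iff a strictly longer one exists anywhere
theorem break_iff_bigger (strs L : List String) (hperm : L.Perm strs)
    (hpair : L.Pairwise (fun x y => PySem.Str.len y ≤ PySem.Str.len x))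
    (i : Nat) (hi : i < L.length) (hc : List.count L[i] strs = 1) :
    ((∃ k, k < i ∧ (L[i]).toList.Sublist ((L.getD k "").toList)) ↔
     (∃ t ∈ strs, (L[i]).toList.length < t.toList.length ∧ (L[i]).toList.Sublist t.toList)) := by
  constructor
  · rintro ⟨k, hk, hsub⟩
    have hkl : k < L.length := by omega
    rw [List.getD_eq_getElem L "" hkl] at hsub
    refine ⟨L[k], hperm.mem_iff.mp (List.getElem_mem _), ?_, hsub⟩
    rcases lt_or_eq_of_le hsub.length_le with h | h
    · exact h
    · exfalso
      have he : L[i] = L[k] := by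
        apply String.toList_inj.mp
        exact (hsub.length_eq.mp h)
      have h2 := two_le_count_of_getElem_eq L k i hkl hi hk he.symm
      rw [← he, hperm.count_eq] at h2
      omega
  · rintro ⟨t, ht, hlen, hsub⟩
    obtain ⟨k, hk, he⟩ := List.mem_iff_getElem.mp (hperm.mem_iff.mpr ht)
    subst he
    refine ⟨k, ?_, by rw [List.getD_eq_getElem L "" hk]; exact hsub⟩
    by_contra hki
    have hki' : i ≤ k := by omega
    rcases lt_or_eq_of_le hki' with h | h
    · exact absurd (pair_len_le L hpair i k hi hk h) (by omega)
    · subst h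
      omega

-- the for-j loop breaks iff some index in [j, i) holds a full-length-LCS string
theorem breakA_iff (s : String) (L : List String) (i : Nat) :
    ∀ (n j : Nat), i - j ≤ n →
      (pvBreakA s L j i = true ↔
        ∃ k, j ≤ k ∧ k < i ∧ pvLCS s (L.getD k "") = PySem.Str.len s) := by
  intro n
  induction n with
  | zero =>
    intro j hj
    rw [pvBreakA, if_neg (by omega)]
    simp only [Bool.false_eq_true, false_iff]
    rintro ⟨k, h1, h2, _⟩
    omega
  | succ n ih =>
    intro j hj
    rw [pvBreakA]
    by_cases hji : j < i
    · rw [if_pos hji]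
      by_cases hcond : pvLCS s (L.getD j "") = PySem.Str.len s
      · rw [if_pos hcond]
        simp only [true_iff]
        exact ⟨j, le_refl j, hji, hcond⟩
      · rw [if_neg hcond, ih (j+1) (by omega)]
        constructor
        · rintro ⟨k, h1, h2, h3⟩
          exact ⟨k, by omega, h2, h3⟩
        · rintro ⟨k, h1, h2, h3⟩
          refine ⟨k, ?_, h2, h3⟩
          rcases lt_or_eq_of_le h1 with h | h
          · omega
          · exfalso; subst h; exact hcond h3
    · rw [if_neg hji]
      simp only [Bool.false_eq_true, false_iff]
      rintro ⟨k, h1, h2, _⟩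
      omega

-- the scan from index i is the max qualifier length in the rest of the sorted list
theorem scanA_fold (strs L : List String) (d : PySem.Dict String Int)
    (hperm : L.Perm strs)
    (hpair : L.Pairwise (fun x y => PySem.Str.len y ≤ PySem.Str.len x))
    (hd : ∀ s, d.getD s 0 = (List.count s strs : Int)) :
    ∀ (n i : Nat), L.length - i ≤ n →
      pvScanA L d i =
        ((L.drop i).filter (pvQ strs)).foldl (fun m s => max m (PySem.Str.len s)) (-1) := by
  intro n
  induction n with
  | zero =>
    intro i hn
    rw [pvScanA, dif_neg (by omega), List.drop_of_length_le (by omega)]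
    rfl
  | succ n ih =>
    intro i hn
    by_cases hi : i < L.length
    · rw [pvScanA, dif_pos hi]
      have hgd : L.getD i "" = L[i] := List.getD_eq_getElem L "" hi
      have hdrop : L.drop i = L[i] :: L.drop (i+1) := List.drop_eq_getElem_cons hi
      by_cases hc : List.count (L[i]) strs = 1
      · have hc' : d.getD (L.getD i "") 0 = 1 := by rw [hgd, hd, hc]; rfl
        rw [if_pos hc']
        have hbrk := breakA_iff (L.getD i "") L i i 0 (by omega)
        by_cases hb : pvBreakA (L.getD i "") L 0 i = true
        · -- an earlier supersequence exists: L[i] is not a qualifier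
          rw [if_pos hb]
          obtain ⟨k, _, hk2, hk3⟩ := hbrk.mp hb
          have hsub : (L[i]).toList.Sublist ((L.getD k "").toList) := by
            rw [hgd] at hk3
            exact (pvLCS_eq_len_iff (L[i]) (L.getD k "")).mp hk3
          have hbig := (break_iff_bigger strs L hperm hpair i hi hc).mp ⟨k, hk2, hsub⟩
          have hany : (strs.any (fun t => decide ((L[i]).toList.length < t.toList.length) &&
              decide ((L[i]).toList.Sublist t.toList))) = true := by
            rw [List.any_eq_true]
            obtain ⟨t, ht, h1, h2⟩ := hbig
            exact ⟨t, ht, by rw [decide_eq_true h1, decide_eq_true h2]; rfl⟩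
          have hq : pvQ strs (L[i]) = false := by
            simp only [pvQ, hany]
            simp
          rw [ih (i+1) (by omega), hdrop, List.filter_cons, hq]
          simp
        · -- no earlier supersequence: L[i] qualifies and its length is the max
          rw [if_neg hb]
          have hnobig : ¬ ∃ t ∈ strs, (L[i]).toList.length < t.toList.length ∧ (L[i]).toList.Sublist t.toList := by
            intro hex
            obtain ⟨k, hk2, hsub⟩ := (break_iff_bigger strs L hperm hpair i hi hc).mpr hex
            apply hb
            apply hbrk.mpr
            refine ⟨k, by omega, hk2, ?_⟩
            rw [hgd]
            exact (pvLCS_eq_len_iff _ _).mpr hsub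
          have hq : pvQ strs (L[i]) = true := by
            simp only [pvQ, Bool.and_eq_true, beq_iff_eq, Bool.not_eq_eq_eq_not, Bool.not_true,
              Bool.not_eq_true']
            refine ⟨hc, ?_⟩
            rw [← Bool.not_eq_true, List.any_eq_true]
            rintro ⟨t, ht, hcond⟩
            simp only [Bool.and_eq_true, decide_eq_true_eq] at hcond
            exact hnobig ⟨t, ht, hcond.1, hcond.2⟩
          rw [hdrop, List.filter_cons, hq, if_pos rfl]
          simp only [List.foldl_cons]
          rw [hgd]
          have hmax : max (-1 : Int) (PySem.Str.len (L[i])) = PySem.Str.len (L[i]) := by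
            rw [PySem.Str.len_eq]
            have : (0 : Int) ≤ ((L[i]).toList.length : Int) := Int.natCast_nonneg _
            omega
          rw [hmax]
          apply (foldl_max_of_le _ _ ?_).symm
          intro x hx
          have hx' : x ∈ L.drop (i+1) := List.mem_of_mem_filter hx
          obtain ⟨r, hr, he⟩ := List.mem_iff_getElem.mp hx'
          have hrl : (i+1) + r < L.length := by simp at hr; omega
          have hxe : x = L[(i+1)+r] := by rw [← he, List.getElem_drop]
          have hle := pair_len_le L hpair i ((i+1)+r) hi hrl (by omega)
          rw [hxe, PySem.Str.len_eq, PySem.Str.len_eq]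
          exact_mod_cast hle
      · have hc' : ¬ d.getD (L.getD i "") 0 = 1 := by
          rw [hgd, hd]
          intro h
          exact hc (by exact_mod_cast h)
        rw [if_neg hc']
        have hq : pvQ strs (L[i]) = false := by
          simp [pvQ, hc]
        rw [ih (i+1) (by omega), hdrop, List.filter_cons, hq]
        simp
    · rw [pvScanA, dif_neg hi, List.drop_of_length_le (by omega)]
      rfl

-- A's scan is the same max
theorem scanA_eq_foldMax (strs : List String) :
    findLUSlength strs =
      ((strs.filter (pvQ strs)).foldl (fun m s => max m (PySem.Str.len s)) (-1)) := by
  show pvScanA _ _ 0 = _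
  have hperm := PySem.List.sorted_perm strs (fun x => PySem.Str.len x) true
  have hpair := PySem.List.sorted_pairwise_rev strs (fun x => PySem.Str.len x)
  have hd : ∀ s, ((PySem.List.sorted strs (fun x => PySem.Str.len x) true).foldl
      (fun d s => d.modify s 0 (· + 1)) PySem.Dict.empty).getD s 0
      = (List.count s strs : Int) := by
    intro s
    rw [PySem.Dict.getD_foldl_modify_add_one, PySem.Dict.getD_empty, hperm.count_eq]
    simp
  rw [scanA_fold strs (PySem.List.sorted strs (fun x => PySem.Str.len x) true) _
    hperm hpair hd (PySem.List.sorted strs (fun x => PySem.Str.len x) true).length 0 (by omega)]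
  simp only [List.drop_zero]
  have hpf : ((PySem.List.sorted strs (fun x => PySem.Str.len x) true).filter (pvQ strs)).Perm
      (strs.filter (pvQ strs)) := hperm.filter _
  haveI : RightCommutative (fun (m : Int) (s : String) => max m (PySem.Str.len s)) :=
    ⟨fun b a1 a2 => sup_right_comm b (PySem.Str.len a1) (PySem.Str.len a2)⟩
  exact hpf.foldl_eq (-1)

-- ===== VERDICT (by name: the statement is the Claim_ definition above) =====
theorem findLUSlength_spec : Claim_equal_findLUSlength := by
  intro strs _
  unfold Spec_findLUSlength
  rw [altB_eq_foldMax, scanA_eq_foldMax]
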